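-- pv_equiv track=rewrite | github.com/bxy123456/an_qu_project | an_qu/tool/tools.py | get_better_three
-- ===== SOURCE A (Python) =====
-- def get_better_three(list1, list2):
--     max = 0
--     dict = {}
--     for x, text in enumerate(list1):
--         r = 0
--         text = list(set(text))
--         for i in text:
--             if i in list2:
--                 r += 1
--         dict[x] = r
--     result = sorted(dict, key=dict.__getitem__, reverse=True)
--     return result[0:3]
-- ===== SOURCE B (Python) =====
-- def _place(top, c, i):
--     # insert (c, i) just before the first entry whose count is lower
--     if not top or top[0][0] < c:
--         return [(c, i)] + top
--     return [top[0]] + _place(top[1:], c, i)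
--
-- def get_better_three(list1, list2):
--     s2 = set(list2)
--     top = []  # at most 3 (count, index) pairs, best first, earlier index wins ties
--     for i, text in enumerate(list1):
--         top = _place(top, len(set(text) & s2), i)[:3]
--     return [i for _, i in top]
-- ===== Notes on version B (the rewrite author's own statement) =====
-- stated objective: alternative
-- what changed: B replaces A's dict-of-counts plus full stable reverse sort with a single streaming pass that scores each item by one set intersection and maintains only the current top-3 (count, index) pairs via bounded ordered insertion, so no dict and no sort of all n items is ever built.
import Mathlib
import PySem

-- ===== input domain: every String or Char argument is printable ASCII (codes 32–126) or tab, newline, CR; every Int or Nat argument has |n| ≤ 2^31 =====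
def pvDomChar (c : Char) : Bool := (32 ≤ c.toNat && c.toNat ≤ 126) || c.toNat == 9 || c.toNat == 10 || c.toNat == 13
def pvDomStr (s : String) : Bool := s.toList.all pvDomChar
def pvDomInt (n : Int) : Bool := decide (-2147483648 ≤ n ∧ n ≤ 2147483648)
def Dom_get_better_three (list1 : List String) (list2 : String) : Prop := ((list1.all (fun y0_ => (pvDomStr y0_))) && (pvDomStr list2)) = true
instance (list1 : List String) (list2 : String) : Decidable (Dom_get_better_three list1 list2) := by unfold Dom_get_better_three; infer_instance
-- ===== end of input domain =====

-- B drops A's dict and full stable reverse sort: one streaming pass scores each item by a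
-- set intersection and maintains only the current top-3 (count, index) pairs by bounded
-- ordered insertion (objective: alternative).


-- ===== PORT A =====
def get_better_three (list1 : List String) (list2 : String) : List Int :=
  -- `max = 0` in the source is dead code
  let d : PySem.Dict Int Int :=
    (PySem.List.enumerate list1 0).foldl
      (fun d xt =>
        let text : PySem.Set Char := PySem.Set.ofList xt.2.toList
        -- `i in list2` for a 1-char string i is exactly char membership
        let r : Int := text.foldl (fun r i => if list2.toList.contains i then r + 1 else r) 0
        d.insert xt.1 r)
      PySem.Dict.empty
  let result := PySem.List.sorted d.keys (fun k => d.getD k 0) true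
  PySem.List.slice result (some 0) (some 3)

-- ===== PORT B =====
-- _place: insert (c, i) just before the first kept entry whose count is lower
def pvPlace (top : List (Int × Int)) (c i : Int) : List (Int × Int) :=
  match top with
  | [] => [(c, i)]
  | p :: rest => if p.1 < c then (c, i) :: p :: rest else p :: pvPlace rest c i

def get_better_three_alt (list1 : List String) (list2 : String) : List Int :=
  let s2 : PySem.Set Char := PySem.Set.ofList list2.toList
  let top : List (Int × Int) :=
    (PySem.List.enumerate list1 0).foldl
      (fun top it =>
        (pvPlace top ((PySem.Set.inter (PySem.Set.ofList it.2.toList) s2).length : Int) it.1).take 3)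
      []
  top.map (fun p => p.2)

-- ===== PRECONDITION & SPEC =====
def Spec_get_better_three (list1 : List String) (list2 : String) (out : List Int) : Prop := out = get_better_three_alt list1 list2
instance (list1 : List String) (list2 : String) (out : List Int) : Decidable (Spec_get_better_three list1 list2 out) := by unfold Spec_get_better_three; infer_instance

-- ===== CLAIM (what is proved, stated in full; the proofs are below) =====
def Claim_equal_get_better_three : Prop := ∀ (list1 : List String) (list2 : String), Dom_get_better_three list1 list2 → Spec_get_better_three list1 list2 (get_better_three list1 list2)

-- ===== LEMMAS AND PROOFS =====

-- B's bounded insertion is insertBy on pairs compared by count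
theorem pvPlace_eq_insertBy (top : List (Int × Int)) (c i : Int) :
    pvPlace top c i
      = PySem.List.insertBy (fun x y : Int × Int => decide (y.1 < x.1)) (c, i) top := by
  induction top with
  | nil => simp [pvPlace, PySem.List.insertBy]
  | cons p rest ih => simp [pvPlace, PySem.List.insertBy, ih]

-- truncating to k commutes with ordered insertion
theorem pv_take_insertBy {α : Type} (b : α → α → Bool) (x : α) :
    ∀ (l : List α) (k : Nat),
      (PySem.List.insertBy b x (l.take k)).take k = (PySem.List.insertBy b x l).take k := by
  intro l
  induction l with
  | nil => intro k; simp
  | cons y t ih =>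
    intro k
    cases k with
    | zero => simp
    | succ m =>
      simp only [List.take_succ_cons, PySem.List.insertBy]
      by_cases hb : b x y
      · simp only [hb, if_true]
        cases m with
        | zero => simp
        | succ m' => simp [List.take_take]
      · simp only [hb, Bool.false_eq_true, if_false, List.take_succ_cons, ih m]

-- folding "insert then truncate to 3" computes the truncation of the full insertion sort
theorem pv_foldl_take_insertBy {α : Type} (b : α → α → Bool) :
    ∀ (ps acc : List α),
      ps.foldl (fun t p => (PySem.List.insertBy b p t).take 3) (acc.take 3)
        = (ps.foldl (fun t p => PySem.List.insertBy b p t) acc).take 3 := by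
  intro ps
  induction ps with
  | nil => intro acc; rfl
  | cons p ps ih =>
    intro acc
    simp only [List.foldl_cons]
    rw [pv_take_insertBy b p acc 3, ih (PySem.List.insertBy b p acc)]

theorem pv_insertBy_map {α β : Type} (f : α → β) (bA : α → α → Bool) (bB : β → β → Bool)
    (x : α) (ys : List α) (h : ∀ y, bB (f x) (f y) = bA x y) :
    PySem.List.insertBy bB (f x) (ys.map f) = (PySem.List.insertBy bA x ys).map f := by
  induction ys with
  | nil => simp [PySem.List.insertBy]
  | cons y ys ih =>
    simp only [List.map_cons, PySem.List.insertBy, h y]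
    split
    · simp
    · simp only [List.map_cons, List.cons.injEq, true_and]
      exact ih

theorem pv_foldl_insertBy_map {α β : Type} (f : α → β) (bA : α → α → Bool) (bB : β → β → Bool)
    (h : ∀ x y, bB (f x) (f y) = bA x y) :
    ∀ (ks acc : List α),
      (ks.map f).foldl (fun a p => PySem.List.insertBy bB p a) (acc.map f)
        = (ks.foldl (fun a x => PySem.List.insertBy bA x a) acc).map f := by
  intro ks
  induction ks with
  | nil => intro acc; simp
  | cons k ks ih =>
    intro acc
    simp only [List.map_cons, List.foldl_cons]
    rw [pv_insertBy_map f bA bB k acc (h k), ih (PySem.List.insertBy bA k acc)]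

-- building the dict with fresh keys just appends the (key, value) pairs
theorem pv_dict_build (g : Int × String → Int) (l : List (Int × String)) (d : PySem.Dict Int Int)
    (hnd : (l.map Prod.fst).Nodup) (hfresh : ∀ p ∈ l, p.1 ∉ d.keys) :
    (l.foldl (fun d xt => d.insert xt.1 (g xt)) d).items
      = d.items ++ l.map (fun xt => (xt.1, g xt)) := by
  induction l generalizing d with
  | nil => simp
  | cons p l ih =>
    simp only [List.map_cons, List.nodup_cons, List.mem_map] at hnd
    have hp1 : p.1 ∉ d.keys := hfresh p (List.mem_cons_self)
    have hc : d.contains p.1 = false := by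
      simp only [PySem.Dict.keys, List.mem_map, not_exists] at hp1
      simp only [PySem.Dict.contains, List.any_eq_false]
      intro q hq
      simpa using fun h => (hp1 q) ⟨hq, h⟩
    have hins : (d.insert p.1 (g p)).items = d.items ++ [(p.1, g p)] := by
      simp [PySem.Dict.insert, hc]
    have hfresh' : ∀ q ∈ l, q.1 ∉ (d.insert p.1 (g p)).keys := by
      intro q hq
      simp only [PySem.Dict.keys, hins, List.map_append, List.mem_append, List.map_cons,
        List.map_nil, List.mem_cons, List.not_mem_nil, or_false, not_or]
      refine ⟨fun h => hfresh q (List.mem_cons_of_mem _ hq) ?_, fun h => hnd.1 ⟨q, hq, h⟩⟩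
      simpa [PySem.Dict.keys] using h
    simp only [List.foldl_cons, List.map_cons]
    rw [ih (d.insert p.1 (g p)) hnd.2 hfresh', hins]
    simp

theorem pv_find_assoc (l : List (Int × String)) (g : Int × String → Int)
    (hnd : (l.map Prod.fst).Nodup) (it : Int × String) (hit : it ∈ l) :
    List.find? (fun p => p.1 == it.1) (l.map (fun xt => (xt.1, g xt))) = some (it.1, g it) := by
  induction l with
  | nil => simp at hit
  | cons p l ih =>
    simp only [List.map_cons, List.nodup_cons, List.mem_map] at hnd
    rcases List.mem_cons.1 hit with h | h
    · subst h
      simp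
    · have hne : (((p.1, g p) : Int × Int).1 == it.1) = false := by
        simp only [beq_eq_false_iff_ne, ne_eq]
        intro he
        exact hnd.1 ⟨it, h, he.symm⟩
      simp only [List.map_cons, List.find?, hne]
      exact ih hnd.2 h

-- the two counting methods agree
theorem pv_cnt_eq (list2 : String) (t : String) :
    (PySem.Set.ofList t.toList).foldl
        (fun r i => if list2.toList.contains i then r + 1 else r) (0 : Int)
      = ((PySem.Set.inter (PySem.Set.ofList t.toList) (PySem.Set.ofList list2.toList)).length : Int) := by
  rw [PySem.List.foldl_if_add_one]
  rw [zero_add, List.countP_eq_length_filter]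
  show _ = ((List.filter (fun x => (PySem.Set.ofList list2.toList).contains x)
      (PySem.Set.ofList t.toList)).length : Int)
  congr 2
  apply List.filter_congr
  intro x _
  simp [PySem.Set.mem_ofList]

theorem get_better_three_eq (list1 : List String) (list2 : String) :
    get_better_three list1 list2 = get_better_three_alt list1 list2 := by
  simp only [get_better_three, get_better_three_alt]
  set e := PySem.List.enumerate list1 0 with he
  set g : Int × String → Int := fun xt =>
    (PySem.Set.ofList xt.2.toList).foldl
      (fun r i => if list2.toList.contains i then r + 1 else r) 0 with hg
  have hpwlt : e.Pairwise (fun p q => p.1 < q.1) := PySem.List.pairwise_lt_enumerate list1 0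
  have hnd : (e.map Prod.fst).Nodup :=
    (List.pairwise_map.2 hpwlt).imp fun h => by exact ne_of_lt h
  have hd : (e.foldl (fun d xt => d.insert xt.1 (g xt)) PySem.Dict.empty).items
      = e.map (fun xt => (xt.1, g xt)) := by
    rw [pv_dict_build g e PySem.Dict.empty hnd (by simp [PySem.Dict.empty, PySem.Dict.keys])]
    simp [PySem.Dict.empty]
  set d := e.foldl (fun d xt => d.insert xt.1 (g xt)) PySem.Dict.empty with hdd
  have hkeys : d.keys = e.map Prod.fst := by
    simp [PySem.Dict.keys, hd]
  have hget : ∀ it ∈ e, d.getD it.1 0 = g it := by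
    intro it hit
    simp only [PySem.Dict.getD, PySem.Dict.get?, hd, pv_find_assoc e g hnd it hit,
      Option.map_some, Option.getD_some]
  set f : Int → Int × Int := fun k => (d.getD k 0, k) with hf
  set bB : Int × Int → Int × Int → Bool := fun x y => decide (y.1 < x.1) with hbB
  set bA : Int → Int → Bool := fun a b => decide (d.getD b 0 < d.getD a 0) with hbA
  -- B's streaming fold is "insert then truncate" over the key-pairs
  have hBfold : e.foldl
      (fun top it =>
        (pvPlace top ((PySem.Set.inter (PySem.Set.ofList it.2.toList)
            (PySem.Set.ofList list2.toList)).length : Int) it.1).take 3) []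
      = (d.keys.map f).foldl (fun t p => (PySem.List.insertBy bB p t).take 3) [] := by
    rw [hkeys, List.map_map, List.foldl_map]
    apply PySem.List.foldl_congr_mem
    intro acc it hit
    have h1 : ((f ∘ Prod.fst) it)
        = (((PySem.Set.inter (PySem.Set.ofList it.2.toList)
            (PySem.Set.ofList list2.toList)).length : Int), it.1) := by
      simp only [Function.comp_apply, hf]
      rw [hget it hit]
      simp only [hg]
      rw [pv_cnt_eq list2 it.2]
    rw [pvPlace_eq_insertBy, h1, hbB]
  rw [hBfold]
  have h0 : ([] : List (Int × Int)) = (([] : List Int).map f).take 3 := rfl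
  rw [h0, pv_foldl_take_insertBy bB (d.keys.map f) (([] : List Int).map f),
    pv_foldl_insertBy_map f bA bB (by intro x y; simp [hbB, hbA, hf])]
  have hA : PySem.List.sorted d.keys (fun k => d.getD k 0) true
      = d.keys.foldl (fun a x => PySem.List.insertBy bA x a) [] :=
    PySem.List.sorted_rev_eq_foldl_insertBy d.keys _
  rw [← hA]
  rw [PySem.List.slice_zero_start, PySem.List.slice_to _ (by norm_num : (0:Int) ≤ 3)]
  rw [← List.map_take, List.map_map]
  have : ((fun p : Int × Int => p.2) ∘ f) = id := by
    funext k; simp [hf]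
  simp [this]

-- ===== VERDICT (by name: the statement is the Claim_ definition above) =====
theorem get_better_three_spec : Claim_equal_get_better_three := by
  intro list1 list2 _
  unfold Spec_get_better_three
  exact get_better_three_eq list1 list2
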